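-- pv_equiv track=rewrite | github.com/ssiddhantsood/Constraint-Programming-TJHSST-AI | AI/crosswordsNEW.py | makebucket
-- ===== SOURCE A (Python) =====
-- def makebucket(word, lastinserted):
--     bucket = set()
--     for a in range(lastinserted + 1, len(word)):
--         if word[a] != "-":
--             bucket.add((word[:a] + "-" + word[a + 1:], a))
--     if len(bucket) == 1:
--         return bucket
--     for a in bucket:
--         bucket = bucket | makebucket(a[0], a[1])
--     return bucket
-- ===== SOURCE B (Python) =====
-- def makebucket(word, lastinserted):
--     out = []
--     stack = [(word, lastinserted)]
--     while stack:
--         s, i = stack.pop()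
--         children = [(s[:a] + "-" + s[a + 1:], a)
--                     for a in range(i + 1, len(s)) if s[a] != "-"]
--         out.extend(children)
--         stack.extend(reversed(children))
--     return set(out)
-- ===== Notes on version B (the rewrite author's own statement) =====
-- stated objective: alternative
-- what changed: Replaces A's recursion over intermediate sets (which re-unions a copy of the accumulated result set at every level, plus a redundant length-1 early return) with a single iterative depth-first worklist: an explicit stack of (variant, last-dashed-index) pairs whose children are emitted exactly once into a flat list, converted to a set only at the end.
import Mathlib
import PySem

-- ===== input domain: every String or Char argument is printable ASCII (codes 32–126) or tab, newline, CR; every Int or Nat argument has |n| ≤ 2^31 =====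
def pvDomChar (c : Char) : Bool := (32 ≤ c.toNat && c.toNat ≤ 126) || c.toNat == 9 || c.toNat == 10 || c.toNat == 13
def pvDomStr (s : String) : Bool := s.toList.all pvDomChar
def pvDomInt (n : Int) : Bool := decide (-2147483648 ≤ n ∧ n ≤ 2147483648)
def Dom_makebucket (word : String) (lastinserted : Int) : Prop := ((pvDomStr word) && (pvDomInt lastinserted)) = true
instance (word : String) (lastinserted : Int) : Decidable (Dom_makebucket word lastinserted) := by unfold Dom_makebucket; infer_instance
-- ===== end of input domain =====

-- B replaces A's recursion over intermediate sets (with repeated set unions) by one iterative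
-- depth-first worklist that emits every dash-variant exactly once (return value only: neither mutates).

-- ===== PORT A =====
-- word[:a] + "-" + word[a+1:] on the character list; exact for 0 ≤ a ≤ len (all indices reached under Pre_)
def pyDashSub (w : List Char) (a : Int) : List Char :=
  w.take a.toNat ++ '-' :: w.drop (a.toNat + 1)

-- literal port of A; the Nat argument is a fuel bound (totality guard only, never exhausted under Pre_);
-- word[a] is ported as pyGetD with default '-' (out-of-range indices, unreachable under Pre_, are skipped)
def makebucketAux : Nat → String → Int → List (String × Int)
  | 0, _, _ => []
  | fuel+1, word, lastinserted =>
    let w := word.toList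
    let bucket : PySem.Set (String × Int) :=
      (PySem.List.pyRange (lastinserted + 1) (w.length : Int) 1).foldl
        (fun b a =>
          if PySem.List.pyGetD w a '-' ≠ '-'
          then PySem.Set.add b (String.ofList (pyDashSub w a), a)
          else b)
        PySem.Set.empty
    if bucket.length = 1 then bucket
    else bucket.foldl (fun acc p => PySem.Set.union acc (makebucketAux fuel p.1 p.2)) bucket

def makebucket (word : String) (lastinserted : Int) : List (String × Int) :=
  makebucketAux ((word.toList.length - lastinserted).toNat + 1) word lastinserted

-- ===== PORT B =====
-- the children list comprehension of Source B: [(s[:a]+"-"+s[a+1:], a) for a in range(i+1, len(s)) if s[a] != "-"]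
def mbChildren (s : String) (i : Int) : List (String × Int) :=
  (PySem.List.pyRange (i + 1) (s.toList.length : Int) 1).foldl
    (fun cs a =>
      if PySem.List.pyGetD s.toList a '-' ≠ '-'
      then cs ++ [(String.ofList (pyDashSub s.toList a), a)]
      else cs) []

-- the while loop of Source B; the stack top is the list head (Python pops/extends at the list end);
-- the Nat argument is a fuel bound (totality guard only, never exhausted under Pre_)
def mbLoop : Nat → List (String × Int) → List (String × Int) → List (String × Int)
  | 0, out, _ => out
  | _+1, out, [] => out
  | fuel+1, out, (s, i) :: rest =>
      let children := mbChildren s i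
      mbLoop fuel (out ++ children) (children ++ rest)

def makebucket_alt (word : String) (lastinserted : Int) : List (String × Int) :=
  mbLoop (2 ^ (word.toList.length - lastinserted).toNat) [] [(word, lastinserted)]

-- ===== PRECONDITION & SPEC =====
-- Pre_ restricts lastinserted to its natural domain (the last dashed position, -1 at the start):
-- for lastinserted ≤ -2 Python's negative-index wraparound makes both programs dash positions counted
-- from the end (A raises IndexError when the range reaches below -len(word)), accidental behaviour
-- outside the function's purpose which the ports do not model.
def Pre_makebucket (word : String) (lastinserted : Int) : Prop := -1 ≤ lastinserted
instance (word : String) (lastinserted : Int) : Decidable (Pre_makebucket word lastinserted) := by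
  unfold Pre_makebucket; infer_instance

def pvWitness_makebucket : String × Int := ("ab", -1)

def Spec_makebucket (word : String) (lastinserted : Int) (out : List (String × Int)) : Prop :=
  out = makebucket_alt word lastinserted
instance (word : String) (lastinserted : Int) (out : List (String × Int)) : Decidable (Spec_makebucket word lastinserted out) := by
  unfold Spec_makebucket; infer_instance

-- ===== CLAIM (what is proved, stated in full; the proofs are below) =====
def Claim_equal_makebucket : Prop := ∀ (word : String) (lastinserted : Int), Dom_makebucket word lastinserted → Pre_makebucket word lastinserted → Spec_makebucket word lastinserted (makebucket word lastinserted)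

-- ===== LEMMAS AND PROOFS =====

-- the canonical children list: one dash added at each admissible position, ascending
def childrenC (s : String) (i : Int) : List (String × Int) :=
  ((PySem.List.pyRange (i + 1) (s.toList.length : Int) 1).filter
      (fun a => decide (PySem.List.pyGetD s.toList a '-' ≠ '-'))).map
    (fun a => (String.ofList (pyDashSub s.toList a), a))

lemma elig_inrange {w : List Char} {a : Int} (h : PySem.List.pyGetD w a '-' ≠ '-') :
    -(w.length : Int) ≤ a ∧ a < w.length := by
  by_cases hr : PySem.Raise.InRange w.length a
  · exact hr
  · exact absurd (PySem.List.pyGetD_of_none _ _ _ ((PySem.List.pyGet?_eq_none_iff _ _).mpr hr)) h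

lemma length_pyDashSub {w : List Char} {a : Int} (h1 : -(w.length : Int) ≤ a) (h2 : a < w.length) :
    (pyDashSub w a).length = w.length := by
  simp [pyDashSub]
  omega

lemma mem_childrenC {s : String} {i : Int} {p : String × Int} :
    p ∈ childrenC s i ↔ ∃ a : Int, i + 1 ≤ a ∧ a < (s.toList.length : Int) ∧
      PySem.List.pyGetD s.toList a '-' ≠ '-' ∧ p = (String.ofList (pyDashSub s.toList a), a) := by
  simp only [childrenC, List.mem_map, List.mem_filter, PySem.List.mem_pyRange_one,
    decide_eq_true_eq]
  constructor
  · rintro ⟨a, ⟨⟨h1, h2⟩, h3⟩, h4⟩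
    exact ⟨a, h1, h2, h3, h4.symm⟩
  · rintro ⟨a, h1, h2, h3, h4⟩
    exact ⟨a, ⟨⟨h1, h2⟩, h3⟩, h4.symm⟩

lemma mem_childrenC_facts {s : String} {i : Int} {p : String × Int} (h : p ∈ childrenC s i) :
    p.1.toList.length = s.toList.length ∧ i < p.2 ∧ p.2 < (s.toList.length : Int) := by
  obtain ⟨a, h1, h2, h3, h4⟩ := mem_childrenC.mp h
  obtain ⟨hr1, hr2⟩ := elig_inrange h3
  subst h4
  refine ⟨?_, by omega, by omega⟩
  simp [length_pyDashSub hr1 hr2]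

def F (s : String) (i : Int) : List (String × Int) :=
  childrenC s i ++ (childrenC s i).attach.flatMap
    (fun (c : {x : String × Int // x ∈ childrenC s i}) => F c.1.1 c.1.2)
termination_by (s.toList.length - i).toNat
decreasing_by
  have hf := mem_childrenC_facts c.2
  omega

lemma flatMap_attach {α β : Type} (l : List α) (g : α → List β) :
    l.attach.flatMap (fun x => g x.1) = l.flatMap g := by
  calc l.attach.flatMap (fun x => g x.1)
      = List.flatMap g (l.attach.map Subtype.val) := by rw [List.flatMap_map]
    _ = l.flatMap g := by rw [List.attach_map_subtype_val]

lemma F_eq (s : String) (i : Int) :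
    F s i = childrenC s i ++ (childrenC s i).flatMap (fun c => F c.1 c.2) := by
  rw [F]
  exact congrArg (childrenC s i ++ ·) (flatMap_attach (childrenC s i) (fun (c : String × Int) => F c.1 c.2))

lemma childrenC_nil {s : String} {i : Int} (h : (s.toList.length : Int) ≤ i + 1) :
    childrenC s i = [] := by
  rw [childrenC, PySem.List.pyRange_one_eq_nil h]
  rfl

lemma F_nil {s : String} {i : Int} (h : (s.toList.length : Int) ≤ i + 1) : F s i = [] := by
  rw [F_eq, childrenC_nil h]
  simp

-- getElem? facts about the dash substitution
lemma pyDashSub_get_self {w : List Char} {a : Int} (h0 : 0 ≤ a) (h2 : a < w.length) :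
    (pyDashSub w a)[a.toNat]? = some '-' := by
  have hlt : a.toNat < w.length := by omega
  rw [pyDashSub, List.getElem?_append]
  simp [List.length_take, Nat.min_eq_left hlt.le]

lemma pyDashSub_get_ne {w : List Char} {a : Int} (h0 : 0 ≤ a) (h2 : a < w.length)
    {j : Nat} (hj : j ≠ a.toNat) : (pyDashSub w a)[j]? = w[j]? := by
  have hlt : a.toNat < w.length := by omega
  rw [pyDashSub, List.getElem?_append]
  rw [List.length_take, Nat.min_eq_left hlt.le]
  by_cases hja : j < a.toNat
  · rw [if_pos hja, List.getElem?_take, if_pos hja]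
  · rw [if_neg hja]
    rw [List.getElem?_cons]
    rw [if_neg (by omega)]
    rw [List.getElem?_drop]
    congr 1
    omega

-- eligibility expressed through getElem? (for nonnegative indices)
lemma elig_iff_get {w : List Char} {a : Int} (h0 : 0 ≤ a) (h2 : a < w.length) :
    PySem.List.pyGetD w a '-' ≠ '-' ↔ w[a.toNat]? ≠ some '-' := by
  have hget : w[a.toNat]? = some w[a.toNat]! := by
    rw [List.getElem!_eq_getElem?_getD]
    rcases hx : w[a.toNat]? with _ | c
    · rw [List.getElem?_eq_none_iff] at hx; omega
    · rfl
  rw [PySem.List.pyGetD, PySem.List.pyGet?_of_nonneg _ h0, hget]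
  simp

-- invariant of every element of F s i (for -1 ≤ i)
lemma F_inv : ∀ (K : Nat) (s : String) (i : Int), (s.toList.length - i).toNat ≤ K → -1 ≤ i →
    ∀ e ∈ F s i, i < e.2 ∧ e.2 < (s.toList.length : Int) ∧ e.1.toList.length = s.toList.length ∧
      e.1.toList[e.2.toNat]? = some '-' ∧ s.toList[e.2.toNat]? ≠ some '-' ∧
      ∀ j : Nat, (j : Int) ≤ i → e.1.toList[j]? = s.toList[j]? := by
  intro K
  induction K with
  | zero =>
    intro s i hK _ e he
    rw [F_nil (by omega)] at he
    cases he
  | succ K ih =>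
    intro s i hK hi e he
    rw [F_eq] at he
    rcases List.mem_append.mp he with hc | hf
    · obtain ⟨a, h1, h2, h3, h4⟩ := mem_childrenC.mp hc
      obtain ⟨hr1, hr2⟩ := elig_inrange h3
      subst h4
      have h0a : 0 ≤ a := by omega
      refine ⟨by omega, by omega, by simp [length_pyDashSub hr1 hr2], ?_, ?_, ?_⟩
      · simp only [String.toList_ofList]
        exact pyDashSub_get_self h0a h2
      · exact (elig_iff_get h0a h2).mp h3
      · intro j hj
        simp only [String.toList_ofList]
        exact pyDashSub_get_ne h0a h2 (by omega)
    · obtain ⟨c, hcmem, hce⟩ := List.mem_flatMap.mp hf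
      obtain ⟨a, h1, h2, h3, h4⟩ := mem_childrenC.mp hcmem
      obtain ⟨hr1, hr2⟩ := elig_inrange h3
      have h0a : 0 ≤ a := by omega
      have hplen : (pyDashSub s.toList a).length = s.toList.length := length_pyDashSub hr1 hr2
      rw [h4] at hce
      have hce' : e ∈ F (String.ofList (pyDashSub s.toList a)) a := hce
      have hmeas : (((String.ofList (pyDashSub s.toList a)).toList.length : Int) - a).toNat ≤ K := by
        rw [String.toList_ofList, hplen]; omega
      obtain ⟨g1, g2, g3, g4, g5, g6⟩ :=
        ih (String.ofList (pyDashSub s.toList a)) a hmeas (by omega) e hce'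
      rw [String.toList_ofList] at g2 g3 g5 g6
      rw [hplen] at g2 g3
      refine ⟨by omega, g2, g3, g4, ?_, ?_⟩
      · intro hcon
        exact g5 (by rw [pyDashSub_get_ne h0a h2 (by omega)]; exact hcon)
      · intro j hj
        rw [g6 j (by omega)]
        exact pyDashSub_get_ne h0a h2 (by omega)

lemma F_nodup : ∀ (K : Nat) (s : String) (i : Int), (s.toList.length - i).toNat ≤ K → -1 ≤ i →
    (F s i).Nodup := by
  intro K
  induction K with
  | zero =>
    intro s i hK _
    rw [F_nil (by omega)]
    exact List.nodup_nil
  | succ K ih =>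
    intro s i hK hi
    -- facts about elements of the subtree rooted at the child built at index a
    have hsub : ∀ a : Int, i + 1 ≤ a → a < (s.toList.length : Int) →
        PySem.List.pyGetD s.toList a '-' ≠ '-' →
        ∀ e ∈ F (String.ofList (pyDashSub s.toList a)) a,
          e.1.toList[a.toNat]? = some '-' ∧
          (∀ j : Nat, (j : Int) ≤ a → j ≠ a.toNat → e.1.toList[j]? = s.toList[j]?) ∧
          e.1.toList[e.2.toNat]? = some '-' ∧ s.toList[e.2.toNat]? ≠ some '-' ∧
          a < e.2 ∧ e.2 < (s.toList.length : Int) := by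
      intro a h1 h2 h3 e he
      obtain ⟨hr1, hr2⟩ := elig_inrange h3
      have h0 : 0 ≤ a := by omega
      have hplen : (pyDashSub s.toList a).length = s.toList.length := length_pyDashSub hr1 hr2
      have hmeas : (((String.ofList (pyDashSub s.toList a)).toList.length : Int) - a).toNat ≤ K := by
        rw [String.toList_ofList, hplen]; omega
      obtain ⟨g1, g2, g3, g4, g5, g6⟩ :=
        F_inv K (String.ofList (pyDashSub s.toList a)) a hmeas (by omega) e he
      rw [String.toList_ofList] at g2 g5 g6
      rw [hplen] at g2
      refine ⟨?_, ?_, g4, ?_, g1, g2⟩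
      · rw [g6 a.toNat (by omega)]
        exact pyDashSub_get_self h0 h2
      · intro j hj hja
        rw [g6 j hj]
        exact pyDashSub_get_ne h0 h2 hja
      · intro hcon
        exact g5 (by rw [pyDashSub_get_ne h0 h2 (by omega)]; exact hcon)
    rw [F_eq, List.nodup_append]
    refine ⟨?_, ?_, ?_⟩
    · rw [childrenC]
      exact ((PySem.List.nodup_pyRange_one _ _).filter _).map
        (fun x y hxy => by simpa using congrArg Prod.snd hxy)
    · rw [List.nodup_flatMap]
      constructor
      · intro c hc
        obtain ⟨a, h1, h2, h3, h4⟩ := mem_childrenC.mp hc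
        obtain ⟨hr1, hr2⟩ := elig_inrange h3
        have hplen : (pyDashSub s.toList a).length = s.toList.length := length_pyDashSub hr1 hr2
        rw [h4]
        exact ih (String.ofList (pyDashSub s.toList a)) a
          (by rw [String.toList_ofList, hplen]; omega) (by omega)
      · rw [childrenC, List.pairwise_map]
        refine List.Pairwise.imp_of_mem ?_
          ((PySem.List.pairwise_lt_pyRange_one _ _).filter _)
        intro a b ha hb hab
        rw [List.mem_filter, PySem.List.mem_pyRange_one] at ha hb
        have h3a : PySem.List.pyGetD s.toList a '-' ≠ '-' := by
          have := ha.2; simp only [decide_eq_true_eq] at this; exact this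
        have h3b : PySem.List.pyGetD s.toList b '-' ≠ '-' := by
          have := hb.2; simp only [decide_eq_true_eq] at this; exact this
        simp only [Function.onFun]
        intro e hea heb
        obtain ⟨pa1, pa2, pa3, pa4, pa5, pa6⟩ :=
          hsub a ha.1.1 ha.1.2 h3a e hea
        obtain ⟨pb1, pb2, pb3, pb4, pb5, pb6⟩ :=
          hsub b hb.1.1 hb.1.2 h3b e heb
        have h0a : 0 ≤ a := by omega
        have : e.1.toList[a.toNat]? = s.toList[a.toNat]? :=
          pb2 a.toNat (by omega) (by omega)
        rw [pa1] at this
        exact ((elig_iff_get h0a ha.1.2).mp h3a) this.symm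
    · intro x hx y hy
      obtain ⟨a, h1a, h2a, h3a, h4a⟩ := mem_childrenC.mp hx
      obtain ⟨c, hcmem, hcy⟩ := List.mem_flatMap.mp hy
      obtain ⟨b, h1b, h2b, h3b, h4b⟩ := mem_childrenC.mp hcmem
      rw [h4b] at hcy
      have hcy' : y ∈ F (String.ofList (pyDashSub s.toList b)) b := hcy
      obtain ⟨pb1, pb2, pb3, pb4, pb5, pb6⟩ := hsub b h1b h2b h3b y hcy'
      have h0a : 0 ≤ a := by omega
      have h0b : 0 ≤ b := by omega
      by_cases hab : a = b
      · subst hab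
        intro hxy
        rw [h4a] at hxy
        have hy1 : y.1.toList = pyDashSub s.toList a := by
          rw [← hxy]; exact String.toList_ofList
        rw [hy1] at pb3
        rw [pyDashSub_get_ne h0a h2a (by omega)] at pb3
        exact pb4 pb3
      · intro hxy
        rw [h4a] at hxy
        have hy1 : y.1.toList = pyDashSub s.toList a := by
          rw [← hxy]; exact String.toList_ofList
        rw [hy1] at pb1
        rw [pyDashSub_get_ne h0a h2a (by omega)] at pb1
        exact ((elig_iff_get h0b h2b).mp h3b) pb1

-- A's bucket-building fold is the canonical children list
lemma bucketFoldAux (s : String) :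
    ∀ (K : Nat) (j : Int) (acc : List (String × Int)), ((s.toList.length : Int) - j).toNat ≤ K →
      (∀ p ∈ acc, p.2 < j) →
      (PySem.List.pyRange j (s.toList.length : Int) 1).foldl
        (fun b a =>
          if PySem.List.pyGetD s.toList a '-' ≠ '-'
          then PySem.Set.add b (String.ofList (pyDashSub s.toList a), a)
          else b) acc
      = acc ++ ((PySem.List.pyRange j (s.toList.length : Int) 1).filter
          (fun a => decide (PySem.List.pyGetD s.toList a '-' ≠ '-'))).map
            (fun a => (String.ofList (pyDashSub s.toList a), a)) := by
  intro K
  induction K with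
  | zero =>
    intro j acc hK hacc
    rw [PySem.List.pyRange_one_eq_nil (by omega)]
    simp
  | succ K ih =>
    intro j acc hK hacc
    by_cases hj : j < (s.toList.length : Int)
    · rw [PySem.List.pyRange_one_cons hj]
      simp only [List.foldl_cons, List.filter_cons]
      by_cases helig : PySem.List.pyGetD s.toList j '-' ≠ '-'
      · rw [if_pos helig]
        have hnot : (String.ofList (pyDashSub s.toList j), j) ∉ acc := by
          intro hmem
          have := hacc _ hmem
          simp at this
        rw [PySem.Set.add_of_not_mem hnot]
        rw [ih (j + 1) (acc ++ [(String.ofList (pyDashSub s.toList j), j)]) (by omega) ?hacc']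
        case hacc' =>
          intro p hp
          rcases List.mem_append.mp hp with h | h
          · have := hacc _ h; omega
          · simp at h; rw [h]; omega
        simp [helig]
      · rw [if_neg helig]
        rw [ih (j + 1) acc (by omega) (by intro p hp; have := hacc _ hp; omega)]
        simp at helig
        simp [helig]
    · rw [PySem.List.pyRange_one_eq_nil (by omega)]
      simp

lemma bucketFold_eq (s : String) (i : Int) :
    (PySem.List.pyRange (i + 1) (s.toList.length : Int) 1).foldl
      (fun b a =>
        if PySem.List.pyGetD s.toList a '-' ≠ '-'
        then PySem.Set.add b (String.ofList (pyDashSub s.toList a), a)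
        else b)
      PySem.Set.empty = childrenC s i := by
  have := bucketFoldAux s ((s.toList.length : Int) - (i + 1)).toNat (i + 1) [] (by omega)
    (by intro p hp; cases hp)
  simpa [childrenC, PySem.Set.empty] using this

-- B's children fold is the canonical children list
lemma mbChildren_eq (s : String) (i : Int) : mbChildren s i = childrenC s i := by
  unfold mbChildren childrenC
  rw [PySem.List.foldl_congr_mem _
    (fun (cs : List (String × Int)) (a : Int) =>
      if PySem.List.pyGetD s.toList a '-' ≠ '-'
      then cs ++ [(String.ofList (pyDashSub s.toList a), a)] else cs)
    (fun (cs : List (String × Int)) (a : Int) =>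
      if (fun a => decide (PySem.List.pyGetD s.toList a '-' ≠ '-')) a = true
      then cs ++ [(String.ofList (pyDashSub s.toList a), a)] else cs)
    [] (by
      intro acc x _
      by_cases h : PySem.List.pyGetD s.toList x '-' ≠ '-' <;> simp [h])]
  rw [PySem.List.foldl_append_if]
  simp

-- folding set-union over pairwise-fresh blocks is concatenation
lemma foldl_union {α : Type} [BEq α] [LawfulBEq α] :
    ∀ (L : List α) (g : α → List α) (acc : List α), (acc ++ L.flatMap g).Nodup →
      L.foldl (fun a c => PySem.Set.union a (g c)) acc = acc ++ L.flatMap g := by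
  intro L g
  induction L with
  | nil => intro acc h; simp
  | cons c L ih =>
    intro acc h
    rw [List.flatMap_cons] at h ⊢
    rw [← List.append_assoc] at h ⊢
    rw [List.foldl_cons]
    have h' := h
    rw [List.append_assoc, List.nodup_append] at h'
    obtain ⟨hacc, hrest, hdisj⟩ := h'
    have hgc : (g c).Nodup := ((List.nodup_append.mp hrest).1)
    have hu : PySem.Set.union acc (g c) = acc ++ g c := by
      apply PySem.Set.update_eq_append_of_disjoint _ _ hgc
      intro x hxg hxacc
      exact hdisj _ hxacc _ (List.mem_append_left _ hxg) rfl
    rw [hu]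
    exact ih (acc ++ g c) h

-- A's port computes F (fuel never runs out under Pre_)
lemma A_eq_F : ∀ (fuel : Nat) (s : String) (i : Int), -1 ≤ i →
    (s.toList.length - i).toNat < fuel → makebucketAux fuel s i = F s i := by
  intro fuel
  induction fuel with
  | zero => intro s i _ h; omega
  | succ fuel ih =>
    intro s i hi hfuel
    simp only [makebucketAux]
    rw [bucketFold_eq s i]
    by_cases hlen : (childrenC s i).length = 1
    · rw [if_pos hlen]
      obtain ⟨c, hc⟩ := List.length_eq_one_iff.mp hlen
      have hcC : c ∈ childrenC s i := by rw [hc]; exact List.mem_singleton_self c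
      obtain ⟨a, h1, h2, h3, h4⟩ := mem_childrenC.mp hcC
      obtain ⟨hr1, hr2⟩ := elig_inrange h3
      have h0a : 0 ≤ a := by omega
      have hplen : (pyDashSub s.toList a).length = s.toList.length := length_pyDashSub hr1 hr2
      have hc1 : c.1.toList = pyDashSub s.toList a := by
        rw [h4]; exact String.toList_ofList
      have hc2 : c.2 = a := by rw [h4]
      have hcnil : childrenC c.1 c.2 = [] := by
        rw [List.eq_nil_iff_forall_not_mem]
        intro p hp
        obtain ⟨b, g1, g2, g3, _⟩ := mem_childrenC.mp hp
        rw [hc1] at g2 g3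
        rw [hplen] at g2
        rw [hc2] at g1
        have hb0 : (0:Int) ≤ b := by omega
        have hgb : (pyDashSub s.toList a)[b.toNat]? ≠ some '-' :=
          (elig_iff_get hb0 (by rw [hplen]; exact g2)).mp g3
        rw [pyDashSub_get_ne h0a h2 (by omega)] at hgb
        have hbs : PySem.List.pyGetD s.toList b '-' ≠ '-' := (elig_iff_get hb0 g2).mpr hgb
        have hmem2 : (String.ofList (pyDashSub s.toList b), b) ∈ childrenC s i :=
          mem_childrenC.mpr ⟨b, by omega, g2, hbs, rfl⟩
        rw [hc] at hmem2
        have heq := List.mem_singleton.mp hmem2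
        rw [h4] at heq
        have hba : b = a := by simpa using congrArg Prod.snd heq
        omega
      have hFc : F c.1 c.2 = [] := by rw [F_eq, hcnil]; simp
      rw [F_eq, hc]
      simp [hFc]
    · rw [if_neg hlen]
      have hcongr := PySem.List.foldl_congr_mem (childrenC s i)
        (fun (acc : List (String × Int)) (p : String × Int) =>
          PySem.Set.union acc (makebucketAux fuel p.1 p.2))
        (fun (acc : List (String × Int)) (p : String × Int) =>
          PySem.Set.union acc (F p.1 p.2))
        (childrenC s i)
        (by
          intro acc p hp
          obtain ⟨hplen, hpi, hpn⟩ := mem_childrenC_facts hp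
          show PySem.Set.union acc (makebucketAux fuel p.1 p.2)
              = PySem.Set.union acc (F p.1 p.2)
          rw [ih p.1 p.2 (by omega) (by omega)])
      rw [hcongr]
      rw [foldl_union (childrenC s i) (fun c => F c.1 c.2) (childrenC s i)
        (by rw [← F_eq]
            exact F_nodup ((s.toList.length - i).toNat) s i (le_refl _) hi)]
      exact (F_eq s i).symm

-- potential of a stack entry / stack, bounding the number of loop iterations
def phi (e : String × Int) : Nat := 2 ^ ((e.1.toList.length - e.2).toNat)
def Phi (stack : List (String × Int)) : Nat := (stack.map phi).sum

lemma Phi_CFrom (s : String) :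
    ∀ (K : Nat) (j : Int), ((s.toList.length : Int) - j).toNat ≤ K →
      Phi (((PySem.List.pyRange j (s.toList.length : Int) 1).filter
          (fun a => decide (PySem.List.pyGetD s.toList a '-' ≠ '-'))).map
            (fun a => (String.ofList (pyDashSub s.toList a), a)))
        ≤ 2 ^ (((s.toList.length : Int) - j + 1).toNat) - 2 := by
  intro K
  induction K with
  | zero =>
    intro j hK
    rw [PySem.List.pyRange_one_eq_nil (by omega)]
    simp [Phi]
  | succ K ih =>
    intro j hK
    by_cases hj : j < (s.toList.length : Int)
    · rw [PySem.List.pyRange_one_cons hj]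
      rw [List.filter_cons]
      have e1 : ((s.toList.length : Int) - (j + 1) + 1).toNat
          = ((s.toList.length : Int) - j).toNat := by omega
      have e2 : ((s.toList.length : Int) - j + 1).toNat
          = ((s.toList.length : Int) - j).toNat + 1 := by omega
      have hIH := ih (j + 1) (by omega)
      rw [e1] at hIH
      rw [e2]
      rw [pow_succ]
      have hpos : 1 ≤ 2 ^ (((s.toList.length : Int) - j).toNat) := Nat.one_le_two_pow
      by_cases helig : PySem.List.pyGetD s.toList j '-' ≠ '-'
      · rw [if_pos (by simpa using helig)]
        obtain ⟨hr1, hr2⟩ := elig_inrange helig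
        rw [List.map_cons]
        unfold Phi at hIH ⊢
        rw [List.map_cons, List.sum_cons]
        have hphi : phi (String.ofList (pyDashSub s.toList j), j)
            = 2 ^ (((s.toList.length : Int) - j).toNat) := by
          unfold phi
          rw [String.toList_ofList, length_pyDashSub hr1 hr2]
        rw [hphi]
        have hpos2 : 2 ≤ 2 ^ (((s.toList.length : Int) - j).toNat) := by
          have hm : 1 ≤ ((s.toList.length : Int) - j).toNat := by omega
          calc (2:Nat) = 2 ^ 1 := rfl
            _ ≤ 2 ^ (((s.toList.length : Int) - j).toNat) :=
              Nat.pow_le_pow_right (by omega) hm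
        generalize 2 ^ (((s.toList.length : Int) - j).toNat) = x at hIH hpos2 ⊢
        exact le_trans (Nat.add_le_add_left hIH x) (by omega)
      · rw [if_neg (by simpa using helig)]
        unfold Phi at hIH ⊢
        generalize 2 ^ (((s.toList.length : Int) - j).toNat) = x at hIH hpos ⊢
        exact le_trans hIH (by omega)
    · rw [PySem.List.pyRange_one_eq_nil (by omega)]
      simp [Phi]

lemma Phi_childrenC (s : String) (i : Int) :
    Phi (childrenC s i) ≤ 2 ^ ((s.toList.length - i).toNat) - 2 := by
  have h := Phi_CFrom s (((s.toList.length : Int)) - (i + 1)).toNat (i + 1) (by omega)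
  have e : ((s.toList.length : Int) - (i + 1) + 1).toNat = ((s.toList.length : Int) - i).toNat := by
    omega
  rw [e] at h
  exact h

-- B's loop flushes the stack into the concatenation of the subtree enumerations
lemma B_eq_F : ∀ (fuel : Nat) (out stack : List (String × Int)), (∀ e ∈ stack, -1 ≤ e.2) →
    Phi stack ≤ fuel → mbLoop fuel out stack = out ++ stack.flatMap (fun e => F e.1 e.2) := by
  intro fuel
  induction fuel with
  | zero =>
    intro out stack hmem hPhi
    cases stack with
    | nil => simp [mbLoop]
    | cons e rest =>
      exfalso
      have h1 : 1 ≤ phi e := Nat.one_le_two_pow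
      unfold Phi at hPhi
      rw [List.map_cons, List.sum_cons] at hPhi
      generalize phi e = x at h1 hPhi
      have hx0 : x ≤ 0 := le_trans (Nat.le_add_right _ _) hPhi
      omega
  | succ fuel ih =>
    intro out stack hmem hPhi
    cases stack with
    | nil => simp [mbLoop]
    | cons e rest =>
      obtain ⟨s, i⟩ := e
      show mbLoop fuel (out ++ mbChildren s i) (mbChildren s i ++ rest)
          = out ++ ((s, i) :: rest).flatMap (fun e => F e.1 e.2)
      rw [mbChildren_eq]
      have hi : -1 ≤ i := hmem (s, i) (by simp)
      have hmem' : ∀ e ∈ childrenC s i ++ rest, -1 ≤ e.2 := by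
        intro e he
        rcases List.mem_append.mp he with h | h
        · have := mem_childrenC_facts h; omega
        · exact hmem _ (List.mem_cons_of_mem _ h)
      have hPhi' : Phi (childrenC s i ++ rest) ≤ fuel := by
        have h1 : Phi (childrenC s i) ≤ 2 ^ ((s.toList.length - i).toNat) - 2 :=
          Phi_childrenC s i
        have hpos : 1 ≤ 2 ^ ((s.toList.length - i).toNat) := Nat.one_le_two_pow
        unfold Phi at hPhi h1 ⊢
        rw [List.map_cons, List.sum_cons] at hPhi
        rw [List.map_append, List.sum_append]
        have hphi : phi (s, i) = 2 ^ ((s.toList.length - i).toNat) := rfl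
        rw [hphi] at hPhi
        generalize (List.map phi (childrenC s i)).sum = u at h1 ⊢
        generalize (List.map phi rest).sum = t at hPhi ⊢
        generalize 2 ^ ((s.toList.length - i).toNat) = x at h1 hpos hPhi
        omega
      rw [ih (out ++ childrenC s i) (childrenC s i ++ rest) hmem' hPhi']
      rw [List.flatMap_cons, List.flatMap_append, F_eq]
      simp [List.append_assoc]

-- ===== VERDICT (by name: the statement is the Claim_ definition above) =====
theorem makebucket_spec : Claim_equal_makebucket := by
  intro word lastinserted _ hpre
  have hl : -1 ≤ lastinserted := hpre
  unfold Spec_makebucket makebucket makebucket_alt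
  rw [A_eq_F _ word lastinserted hl (by omega)]
  rw [B_eq_F _ [] [(word, lastinserted)] (by
      intro e he
      have he' : e = (word, lastinserted) := List.mem_singleton.mp he
      rw [he']
      exact hl)
    (by simp [Phi, phi])]
  simp
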